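-- pv_equiv track=rewrite | github.com/daniel-reich/ubiquitous-fiesta | 3y2FmfjhbiQPPYbcn_23.py | pop
-- ===== SOURCE A (Python) =====
-- def pop(state):
--     s = sum(state)
--     if s == 0:
--         return state
--     cur = state.index(s) - 1
--     water = s - 1
--     while cur >= 0 and water > 0:
--         state[cur] = water
--         cur -= 1
--         water -= 1
--     cur = state.index(s) + 1
--     water = s - 1
--     while cur < len(state) and water > 0:
--         state[cur] = water
--         cur += 1
--         water -= 1
--     return state
-- ===== SOURCE B (Python) =====
-- def pop(state):
--     s = sum(state)
--     if s == 0: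
--         return state
--     peak = state.index(s)
--     for i in range(len(state)):
--         d = abs(i - peak)
--         if 0 < d < s:
--             state[i] = s - d
--     return state
-- ===== Notes on version B (the rewrite author's own statement) =====
-- stated objective: simpler
-- what changed: Replaces A's two outward pointer-walks (left-scan and right-scan from the peak with a decrementing water counter) by a single distance-driven pass: one loop over all indices sets state[i]=s-|i-peak| whenever 0<|i-peak|<s.
import Mathlib
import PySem

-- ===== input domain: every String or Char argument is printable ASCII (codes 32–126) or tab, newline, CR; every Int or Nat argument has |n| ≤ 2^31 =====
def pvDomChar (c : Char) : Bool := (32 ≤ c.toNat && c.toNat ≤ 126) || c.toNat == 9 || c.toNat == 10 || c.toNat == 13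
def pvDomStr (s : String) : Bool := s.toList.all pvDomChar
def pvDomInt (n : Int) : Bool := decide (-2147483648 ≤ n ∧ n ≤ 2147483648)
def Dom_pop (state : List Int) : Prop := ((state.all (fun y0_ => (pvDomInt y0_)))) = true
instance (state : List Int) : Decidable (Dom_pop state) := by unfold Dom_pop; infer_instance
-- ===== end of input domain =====

-- B changes only the decomposition (one distance-driven pass instead of two pointer walks); both mutate `state` in place in Python, the equivalence proved here is about the return value.

-- ===== PORT A =====
-- 'while cur >= 0 and water > 0: state[cur] = water; cur -= 1; water -= 1'
def popLoopL (st : List Int) (cur water : Int) : List Int :=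
  if h : 0 ≤ cur ∧ 0 < water then
    popLoopL (st.set cur.toNat water) (cur - 1) (water - 1)
  else st
termination_by water.toNat
decreasing_by omega

-- 'while cur < len(state) and water > 0: state[cur] = water; cur += 1; water -= 1'
def popLoopR (st : List Int) (cur water : Int) : List Int :=
  if h : cur < (st.length : Int) ∧ 0 < water then
    popLoopR (st.set cur.toNat water) (cur + 1) (water - 1)
  else st
termination_by water.toNat
decreasing_by omega

def pop (state : List Int) : List Int :=
  let s := state.sum
  if s = 0 then state
  else
    match PySem.List.index? state s with
    | none => []        -- Python raises ValueError here; excluded by Pre_pop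
    | some p =>
      let st1 := popLoopL state ((p : Int) - 1) (s - 1)
      match PySem.List.index? st1 s with   -- A calls state.index(s) a second time, on the mutated list
      | none => []      -- Python would raise ValueError; unreachable under Pre_pop
      | some p2 => popLoopR st1 ((p2 : Int) + 1) (s - 1)

-- ===== PORT B =====
def pop_alt (state : List Int) : List Int :=
  let s := state.sum
  if s = 0 then state
  else
    match PySem.List.index? state s with
    | none => []        -- Python raises ValueError here; excluded by Pre_pop
    | some peak =>
      -- 'for i in range(len(state)): d = abs(i - peak); if 0 < d < s: state[i] = s - d'
      state.mapIdx (fun i x =>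
        let d : Int := |(i : Int) - (peak : Int)|
        if 0 < d ∧ d < s then s - d else x)

-- ===== PRECONDITION & SPEC =====
-- Pre_pop excludes exactly the inputs on which A raises ValueError: a nonzero sum that is not an element of the list (B raises there too).
def Pre_pop (state : List Int) : Prop := state.sum = 0 ∨ state.sum ∈ state
instance (state : List Int) : Decidable (Pre_pop state) := by unfold Pre_pop; infer_instance
def pvWitness_pop : List Int := [0, 4, 0, 0]

def Spec_pop (state : List Int) (out : List Int) : Prop := out = pop_alt state
instance (state : List Int) (out : List Int) : Decidable (Spec_pop state out) := by unfold Spec_pop; infer_instance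

-- ===== CLAIM (what is proved, stated in full; the proofs are below) =====
def Claim_equal_pop : Prop := ∀ (state : List Int), Dom_pop state → Pre_pop state → Spec_pop state (pop state)

-- ===== LEMMAS AND PROOFS =====

theorem popLoopL_length (st : List Int) (cur water : Int) :
    (popLoopL st cur water).length = st.length := by
  fun_induction popLoopL st cur water with
  | case1 st cur water h ih => rw [ih]; simp
  | case2 => rfl

theorem popLoopR_length (st : List Int) (cur water : Int) :
    (popLoopR st cur water).length = st.length := by
  fun_induction popLoopR st cur water with
  | case1 st cur water h ih => rw [ih]; simp
  | case2 => rfl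

theorem popLoopL_getElem? (st : List Int) (cur water : Int) (hc : cur < (st.length : Int))
    (i : Nat) (hi : i < st.length) :
    (popLoopL st cur water)[i]? =
      if (i : Int) ≤ cur ∧ cur - i < water then some (water - (cur - i)) else st[i]? := by
  fun_induction popLoopL st cur water with
  | case1 st cur water h ih =>
    obtain ⟨hw0, hww⟩ := h
    rw [ih (by simpa using by omega) (by simpa using hi), List.getElem?_set]
    split_ifs with h1 h2 h3 h4 h5 h6 <;>
      first | rfl | (congr 1; omega)
  | case2 st cur water h =>
    rw [if_neg (by omega)]

theorem popLoopR_getElem? (st : List Int) (cur water : Int) (hc : 0 ≤ cur)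
    (i : Nat) (hi : i < st.length) :
    (popLoopR st cur water)[i]? =
      if cur ≤ (i : Int) ∧ (i : Int) - cur < water then some (water - (i - cur)) else st[i]? := by
  fun_induction popLoopR st cur water with
  | case1 st cur water h ih =>
    obtain ⟨hwl, hww⟩ := h
    rw [ih (by omega) (by simpa using hi), List.getElem?_set]
    split_ifs with h1 h2 h3 h4 h5 h6 <;>
      first | rfl | (congr 1; omega)
  | case2 st cur water h =>
    rw [if_neg (by omega)]

-- after the left walk, the first occurrence of s is still at p
theorem index?_popLoopL (state : List Int) (s : Int) (p : Nat)
    (hp : PySem.List.index? state s = some p) :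
    PySem.List.index? (popLoopL state ((p : Int) - 1) (s - 1)) s = some p := by
  obtain ⟨hlt, hval, hfirst⟩ := PySem.List.getElem_of_index?_eq_some hp
  rw [PySem.List.index?_eq_some_iff]
  have hlen : (popLoopL state ((p : Int) - 1) (s - 1)).length = state.length :=
    popLoopL_length _ _ _
  have hget : ∀ (i : Nat), i < state.length → (popLoopL state ((p : Int) - 1) (s - 1))[i]? =
      if (i : Int) ≤ (p : Int) - 1 ∧ (p : Int) - 1 - i < s - 1
      then some (s - 1 - ((p : Int) - 1 - i)) else state[i]? :=
    fun i hi => popLoopL_getElem? state _ _ (by omega) i hi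
  have hp' : p < (popLoopL state ((p : Int) - 1) (s - 1)).length := by omega
  refine ⟨(popLoopL state ((p : Int) - 1) (s - 1)).take p,
          (popLoopL state ((p : Int) - 1) (s - 1)).drop (p + 1), ?_, ?_, ?_⟩
  · have hval' : (popLoopL state ((p : Int) - 1) (s - 1))[p] = s := by
      have h1 := hget p hlt
      rw [if_neg (by omega), List.getElem?_eq_getElem hlt, hval,
        List.getElem?_eq_getElem hp'] at h1
      exact Option.some_inj.mp h1
    conv_lhs => rw [← List.take_append_drop p (popLoopL state ((p : Int) - 1) (s - 1)),
      List.drop_eq_getElem_cons hp']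
    rw [hval']
  · simp [List.length_take]; omega
  · intro hmem
    rw [List.mem_take_iff_getElem] at hmem
    obtain ⟨j, hj, hjval⟩ := hmem
    have hjp : j < p := by omega
    have h1 := hget j (by omega)
    rw [List.getElem?_eq_getElem (by omega : j < (popLoopL state ((p : Int) - 1) (s - 1)).length),
      hjval] at h1
    by_cases hcond : (j : Int) ≤ (p : Int) - 1 ∧ (p : Int) - 1 - j < s - 1
    · rw [if_pos hcond] at h1
      have h2 : s = s - 1 - ((p : Int) - 1 - j) := Option.some_inj.mp h1
      omega
    · rw [if_neg hcond, List.getElem?_eq_getElem (by omega : j < state.length)] at h1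
      exact hfirst j hjp (Option.some_inj.mp h1).symm

theorem pop_eq_alt (state : List Int) (hpre : Pre_pop state) : pop state = pop_alt state := by
  unfold pop pop_alt
  by_cases hs : state.sum = 0
  · simp [hs]
  · simp only [hs, if_false]
    have hmem : state.sum ∈ state := hpre.resolve_left hs
    obtain ⟨p, hp⟩ :=
      Option.isSome_iff_exists.mp ((PySem.List.index?_isSome_iff state state.sum).mpr hmem)
    rw [hp]
    dsimp only
    obtain ⟨hlt, hval, hfirst⟩ := PySem.List.getElem_of_index?_eq_some hp
    rw [index?_popLoopL state state.sum p hp]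
    dsimp only
    have hlenL : (popLoopL state ((p : Int) - 1) (state.sum - 1)).length = state.length :=
      popLoopL_length _ _ _
    apply List.ext_getElem?
    intro i
    rw [List.getElem?_mapIdx]
    by_cases hi : i < state.length
    · rw [popLoopR_getElem? _ _ _ (by omega) i (by omega),
          popLoopL_getElem? _ _ _ (by omega) i hi,
          List.getElem?_eq_getElem hi]
      simp only [Option.map_some]
      set s := state.sum with hsdef
      by_cases hL : (i : Int) ≤ (p : Int) - 1 ∧ (p : Int) - 1 - i < s - 1
      · have habs : |(i : Int) - (p : Int)| = (p : Int) - i := by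
          rw [abs_of_nonpos (by omega)]; ring
        rw [if_neg (by omega : ¬((p : Int) + 1 ≤ (i : Int) ∧ (i : Int) - ((p : Int) + 1) < s - 1)),
            if_pos hL, habs, if_pos (by omega)]
        congr 1; omega
      · by_cases hR : (p : Int) + 1 ≤ (i : Int) ∧ (i : Int) - ((p : Int) + 1) < s - 1
        · have habs : |(i : Int) - (p : Int)| = (i : Int) - p :=
            abs_of_nonneg (by omega)
          rw [if_pos hR, habs, if_pos (by omega)]
          congr 1; omega
        · rw [if_neg (by omega : ¬((p : Int) + 1 ≤ (i : Int) ∧ (i : Int) - ((p : Int) + 1) < s - 1)),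
              if_neg hL, if_neg ?_]
          intro hcond
          rcases abs_cases ((i : Int) - (p : Int)) with ⟨he, _⟩ | ⟨he, _⟩ <;>
            rw [he] at hcond <;> omega
    · have hlenR : (popLoopR (popLoopL state ((p : Int) - 1) (state.sum - 1))
          ((p : Int) + 1) (state.sum - 1)).length = state.length := by
        rw [popLoopR_length, hlenL]
      rw [List.getElem?_eq_none (by omega), List.getElem?_eq_none (by omega)]
      rfl

-- ===== VERDICT (by name: the statement is the Claim_ definition above) =====
theorem pop_spec : Claim_equal_pop := by
  intro state _ hpre
  exact pop_eq_alt state hpre
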